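-- pv_equiv track=rewrite | github.com/Natsumeretsu/freqtrade_demo | scripts/analysis/auto_risk_replay.py | _streaks
-- ===== SOURCE A (Python) =====
-- def _streaks(flags: list[bool]) -> list[int]:
--     out: list[int] = []
--     cur = 0
--     for f in flags:
--         if f:
--             cur += 1
--         else:
--             if cur > 0:
--                 out.append(cur)
--                 cur = 0
--     if cur > 0:
--         out.append(cur)
--     return out
-- ===== SOURCE B (Python) =====
-- from itertools import groupby
--
--
-- def _streaks(flags: list[bool]) -> list[int]:
--     return [sum(1 for _ in g) for k, g in groupby(flags, key=bool) if k]
-- ===== Notes on version B (the rewrite author's own statement) =====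
-- stated objective: idiomatic
-- what changed: Replaces the manual running counter with reset logic by itertools.groupby(key=bool): group consecutive same-truthiness elements and emit the length of each truthy group.
import Mathlib
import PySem

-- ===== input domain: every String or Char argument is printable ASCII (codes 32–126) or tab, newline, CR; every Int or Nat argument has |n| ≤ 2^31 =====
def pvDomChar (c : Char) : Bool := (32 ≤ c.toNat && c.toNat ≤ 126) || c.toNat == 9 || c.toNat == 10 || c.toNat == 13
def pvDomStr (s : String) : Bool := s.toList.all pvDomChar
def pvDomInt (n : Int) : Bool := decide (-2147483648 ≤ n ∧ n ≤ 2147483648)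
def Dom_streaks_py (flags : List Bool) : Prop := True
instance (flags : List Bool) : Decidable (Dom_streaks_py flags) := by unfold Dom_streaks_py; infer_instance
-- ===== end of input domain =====

-- B replaces A's running counter and reset logic by grouping consecutive equal flags and emitting the length of each true group (idiomatic; same cost).

-- ===== PORT A =====
-- one loop step of A: accumulate cur on True, flush it on False
def streaksStep (st : List Int × Int) (f : Bool) : List Int × Int :=
  if f then (st.1, st.2 + 1)
  else if st.2 > 0 then (st.1 ++ [st.2], (0 : Int)) else st

def streaks_py (flags : List Bool) : List Int :=
  let s := flags.foldl streaksStep ([], 0)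
  if s.2 > 0 then s.1 ++ [s.2] else s.1

-- ===== PORT B =====
-- itertools.groupby on the flags: list of (key, group length) for maximal runs of equal elements
def pyGroupBy : List Bool → List (Bool × Int)
  | [] => []
  | b :: r =>
    match pyGroupBy r with
    | [] => [(b, 1)]
    | (k, n) :: t => if k == b then (b, n + 1) :: t else (b, 1) :: (k, n) :: t

def streaks_py_alt (flags : List Bool) : List Int :=
  (pyGroupBy flags).filterMap (fun kn => if kn.1 then some kn.2 else none)

-- ===== PRECONDITION & SPEC =====
def Spec_streaks_py (flags : List Bool) (out : List Int) : Prop := out = streaks_py_alt flags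
instance (flags : List Bool) (out : List Int) : Decidable (Spec_streaks_py flags out) := by unfold Spec_streaks_py; infer_instance

-- ===== CLAIM (what is proved, stated in full; the proofs are below) =====
def Claim_equal_streaks_py : Prop := ∀ (flags : List Bool), Dom_streaks_py flags → Spec_streaks_py flags (streaks_py flags)

-- ===== LEMMAS AND PROOFS =====

-- what A's loop produces after the tail `flags`, given the running counter cur
def gAux : Int → List Bool → List Int
  | cur, [] => if cur > 0 then [cur] else []
  | cur, true :: r => gAux (cur + 1) r
  | cur, false :: r => (if cur > 0 then [cur] else []) ++ gAux 0 r

def streaksFinish (s : List Int × Int) : List Int :=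
  if s.2 > 0 then s.1 ++ [s.2] else s.1

-- what gAux cur produces when cur > 0: cur merges with a leading true group
def headAdd (cur : Int) : List (Bool × Int) → List Int
  | (true, n) :: t => (cur + n) :: t.filterMap (fun kn => if kn.1 then some kn.2 else none)
  | gs => cur :: gs.filterMap (fun kn => if kn.1 then some kn.2 else none)

theorem foldl_gAux (l : List Bool) : ∀ (out : List Int) (cur : Int), 0 ≤ cur →
    streaksFinish (l.foldl streaksStep (out, cur)) = out ++ gAux cur l := by
  induction l with
  | nil => intro out cur _; simp [streaksFinish, gAux]; split_ifs <;> simp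
  | cons b r ih =>
    intro out cur hc
    cases b with
    | true => simpa [List.foldl, streaksStep, gAux] using ih out (cur + 1) (by omega)
    | false =>
      simp only [List.foldl, streaksStep, gAux, Bool.false_eq_true, if_false]
      split_ifs with h
      · simp [ih _ 0 le_rfl]
      · have hz : cur = 0 := by omega
        subst hz; simp [ih _ 0 le_rfl]

theorem gAux_groups (l : List Bool) : ∀ cur : Int,
    (cur = 0 → gAux cur l = streaks_py_alt l) ∧
    (0 < cur → gAux cur l = headAdd cur (pyGroupBy l)) := by
  induction l with
  | nil =>
    intro cur
    constructor
    · intro h; simp [gAux, h, streaks_py_alt, pyGroupBy]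
    · intro h; simp [gAux, h, headAdd, pyGroupBy]
  | cons b r ih =>
    intro cur
    cases b with
    | true =>
      constructor
      · intro h; subst h
        have h1 := (ih 1).2 (by norm_num)
        simp only [gAux, zero_add, h1, streaks_py_alt, pyGroupBy]
        rcases hg : pyGroupBy r with _ | ⟨⟨k, n⟩, t⟩
        · simp [headAdd, hg]
        · cases k <;> simp [headAdd, hg, List.filterMap] <;> ring
      · intro h
        have h1 := (ih (cur + 1)).2 (by omega)
        simp only [gAux, h1, pyGroupBy]
        rcases hg : pyGroupBy r with _ | ⟨⟨k, n⟩, t⟩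
        · simp [headAdd, hg, add_assoc]
        · cases k <;> simp [headAdd, hg, add_assoc] <;> ring
    | false =>
      have h0 := (ih 0).1 rfl
      have halt : streaks_py_alt (false :: r) = streaks_py_alt r := by
        simp only [streaks_py_alt, pyGroupBy]
        rcases hg : pyGroupBy r with _ | ⟨⟨k, n⟩, t⟩
        · simp [hg]
        · cases k <;> simp [hg, List.filterMap]
      constructor
      · intro h; subst h; simp [gAux, h0, halt]
      · intro h
        have : gAux cur (false :: r) = cur :: streaks_py_alt r := by
          simp [gAux, h, h0]
        rw [this, ← halt]
        simp only [streaks_py_alt, pyGroupBy]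
        rcases hg : pyGroupBy r with _ | ⟨⟨k, n⟩, t⟩
        · simp [headAdd, hg]
        · cases k <;> simp [headAdd, hg, List.filterMap]

-- ===== VERDICT (by name: the statement is the Claim_ definition above) =====
theorem streaks_py_spec : Claim_equal_streaks_py := by
  intro flags _
  show streaks_py flags = streaks_py_alt flags
  have h := foldl_gAux flags [] 0 le_rfl
  have h2 := (gAux_groups flags 0).1 rfl
  simpa [streaks_py, streaksFinish, h2] using h
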